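-- pv_equiv track=rewrite | github.com/iantato/Advent-of-Code | 2015/Day 1/D1.py | get_floor_level
-- ===== SOURCE A (Python) =====
-- def get_floor_level(data) -> int:
--
--     # Initialize the floor level.
--     level : int = 0
--
--     for floor in data:
--
--         # '(' = Santa go up one floor.
--         # ')' = Santa go down one floor.
--         match floor:
--             case '(':
--                 level += 1
--             case ')':
--                 level -= 1
--
--     return level
-- ===== SOURCE B (Python) =====
-- def get_floor_level(data) -> int:
--     # Net floor: number of '(' minus number of ')', via two whole-input counting passes.
--     return data.count('(') - data.count(')')
-- ===== Notes on version B (the rewrite author's own statement) =====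
-- stated objective: simpler
-- what changed: Replaces the per-character branching accumulator loop with a one-line expression: count of '(' minus count of ')', two library counting passes and no running state; the C-level str.count scans also make it measurably faster by a constant factor.
import Mathlib
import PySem

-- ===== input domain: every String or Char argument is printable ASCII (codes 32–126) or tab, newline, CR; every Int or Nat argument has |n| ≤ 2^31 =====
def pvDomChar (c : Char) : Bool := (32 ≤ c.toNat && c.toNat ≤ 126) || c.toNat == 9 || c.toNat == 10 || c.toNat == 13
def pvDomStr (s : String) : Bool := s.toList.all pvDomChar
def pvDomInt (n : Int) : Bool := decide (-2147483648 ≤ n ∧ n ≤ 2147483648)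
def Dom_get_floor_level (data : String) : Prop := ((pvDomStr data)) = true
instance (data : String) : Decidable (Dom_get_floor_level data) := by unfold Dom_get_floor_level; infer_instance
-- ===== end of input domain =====

-- B replaces A's per-character branching accumulator loop with a one-line
-- count('(') - count(')') expression (objective: simpler).

-- ===== PORT A =====
-- for floor in data: match floor: '(' → level += 1, ')' → level -= 1, _ → skip
def get_floor_level (data : String) : Int :=
  data.toList.foldl
    (fun level floor =>
      if floor = '(' then level + 1
      else if floor = ')' then level - 1
      else level) 0

-- ===== PORT B =====
-- data.count('(') - data.count(')')
def get_floor_level_alt (data : String) : Int :=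
  (PySem.Str.count data "(" : Int) - (PySem.Str.count data ")" : Int)

-- ===== PRECONDITION & SPEC =====
def Spec_get_floor_level (data : String) (out : Int) : Prop := out = get_floor_level_alt data
instance (data : String) (out : Int) : Decidable (Spec_get_floor_level data out) := by unfold Spec_get_floor_level; infer_instance

-- ===== CLAIM (what is proved, stated in full; the proofs are below) =====
def Claim_equal_get_floor_level : Prop := ∀ (data : String), Dom_get_floor_level data → Spec_get_floor_level data (get_floor_level data)

-- ===== LEMMAS AND PROOFS =====

-- PySem.Chars.count with a single-character needle is List.count (fuel-indexed go).
theorem pv_count_go_singleton (c : Char) (fuel : Nat) : ∀ (l : List Char) (acc : Nat),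
    l.length ≤ fuel → PySem.Chars.count.go [c] fuel l acc = acc + List.count c l := by
  induction fuel with
  | zero => intro l acc h; simp at h; subst h; simp [PySem.Chars.count.go]
  | succ n ih =>
    intro l acc h
    cases l with
    | nil => simp [PySem.Chars.count.go]
    | cons x xs =>
      simp only [PySem.Chars.count.go, List.isPrefixOf]
      by_cases hc : c == x
      · simp only [hc, Bool.true_and, List.isPrefixOf_nil_left, if_pos]
        rw [List.length_singleton, List.drop_one, List.tail_cons,
          ih xs (acc + 1) (by simpa using Nat.le_of_succ_le_succ h)]
        have hce : c = x := by simpa using hc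
        subst hce
        simp [List.count_cons]
        omega
      · simp only [hc, Bool.false_and, Bool.false_eq_true, not_false_iff, if_neg]
        rw [ih xs acc (by simpa using Nat.le_of_succ_le_succ h)]
        have hce : ¬ x = c := fun he => by simp [he] at hc
        simp [List.count_cons, hce]

theorem pv_count_singleton (l : List Char) (c : Char) :
    PySem.Chars.count l [c] = l.count c := by
  simp [PySem.Chars.count, pv_count_go_singleton c l.length l 0 le_rfl]

-- A's loop invariant: the fold from acc is acc + #'(' - #')'.
theorem pv_fold_eq_counts (l : List Char) : ∀ (acc : Int),
    l.foldl (fun level floor =>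
      if floor = '(' then level + 1
      else if floor = ')' then level - 1
      else level) acc = acc + (l.count '(' : Int) - (l.count ')' : Int) := by
  induction l with
  | nil => intro acc; simp
  | cons x xs ih =>
    intro acc
    simp only [List.foldl_cons, ih, List.count_cons]
    by_cases h1 : x = '('
    · simp [h1]; ring
    · by_cases h2 : x = ')'
      · simp [h2]; ring
      · simp [h1, h2]

-- ===== VERDICT (by name: the statement is the Claim_ definition above) =====
theorem get_floor_level_spec : Claim_equal_get_floor_level := by
  intro data _
  unfold Spec_get_floor_level get_floor_level get_floor_level_alt
  rw [pv_fold_eq_counts]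
  simp only [PySem.Str.count_eq]
  have h1 : ("(" : String).toList = ['('] := rfl
  have h2 : (")" : String).toList = [')'] := rfl
  rw [h1, h2, pv_count_singleton, pv_count_singleton]
  ring
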